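-- pv_equiv track=rewrite | github.com/jboiie/AdventOfCode | D10/solution.py | solve_part2_machine
-- ===== SOURCE A (Python) =====
-- from itertools import product
--
-- def solve_part2_machine(goal_counts, buttons):
--     """
--     Each bit i requires sum_j(x[j] * affects(button_j, bit_i)) == goal_counts[i].
--     Try all button press combinations in a small bounded space.
--     """
--     B = len(buttons)
--     max_presses = max(goal_counts)
--
--     best = None
--
--     for counts in product(range(max_presses + 1), repeat=B):
--         total = sum(counts)
--         if best is not None and total >= best:
--             continue
--
--         produced = [0] * len(goal_counts)
--
--         for j, press_count in enumerate(counts):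
--             mask = buttons[j]
--             for bit in range(len(goal_counts)):
--                 if mask & (1 << bit):
--                     produced[bit] += press_count
--
--         if produced == goal_counts:
--             best = total
--
--     return best
-- ===== SOURCE B (Python) =====
-- def solve_part2_machine(goal_counts, buttons):
--     """
--     Recursive backtracking over buttons carrying the per-bit remaining counts;
--     prunes any branch whose remaining vector has gone negative.
--     """
--     max_presses = max(goal_counts)
--     n = len(goal_counts)
--
--     def contrib(mask):
--         return [1 if mask & (1 << bit) else 0 for bit in range(n)]
--
--     def rec(bs, remaining):
--         if any(r < 0 for r in remaining):
--             return None
--         if not bs: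
--             return 0 if all(r == 0 for r in remaining) else None
--         c = contrib(bs[0])
--         best = None
--         for p in range(max_presses + 1):
--             sub = rec(bs[1:], [r - p * ci for r, ci in zip(remaining, c)])
--             if sub is not None and (best is None or p + sub < best):
--                 best = p + sub
--         return best
--
--     return rec(list(buttons), list(goal_counts))
-- ===== Notes on version B (the rewrite author's own statement) =====
-- stated objective: alternative
-- what changed: Replaces the flat itertools.product enumeration (building a full produced[] vector per combination, with a best-so-far skip) by recursive backtracking over the buttons that carries a decreasing remaining[] vector and prunes every branch in which some remaining entry has gone negative.
import Mathlib
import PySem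

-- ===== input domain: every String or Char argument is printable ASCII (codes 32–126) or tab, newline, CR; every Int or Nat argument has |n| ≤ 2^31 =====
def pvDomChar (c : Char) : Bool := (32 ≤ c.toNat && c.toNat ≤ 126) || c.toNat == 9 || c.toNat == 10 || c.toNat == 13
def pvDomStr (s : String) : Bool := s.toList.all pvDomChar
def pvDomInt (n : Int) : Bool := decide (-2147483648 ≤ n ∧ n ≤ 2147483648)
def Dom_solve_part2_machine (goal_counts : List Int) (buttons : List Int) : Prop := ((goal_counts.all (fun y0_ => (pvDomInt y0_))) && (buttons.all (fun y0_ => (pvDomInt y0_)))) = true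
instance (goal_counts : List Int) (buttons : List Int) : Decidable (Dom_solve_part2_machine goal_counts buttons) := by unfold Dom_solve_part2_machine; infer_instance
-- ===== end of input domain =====

-- B replaces A's flat product enumeration by recursive backtracking on the buttons with a
-- remaining-counts vector and negative-entry pruning (objective: alternative decomposition).

-- ===== PORT A =====

-- itertools.product(range, repeat=B) as a list of length-B lists (first component varies slowest)
def pvProdA (r : List Int) : Nat → List (List Int)
  | 0 => [[]]
  | B + 1 => r.flatMap (fun x => (pvProdA r B).map (x :: ·))

-- body of A's 'for counts in product(...)' loop (best-so-far accumulator)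
def pvStepA (goal_counts buttons : List Int) (best : Option Int) (counts : List Int) : Option Int :=
  let total := counts.sum
  if (match best with | some b => decide (total ≥ b) | none => false) then best
  else
    let produced :=
      (PySem.List.enumerate counts).foldl
        (fun prod jp =>
          let mask := PySem.List.pyGetD buttons jp.1 0    -- j always in range(len(buttons))
          (PySem.List.pyRange 0 (goal_counts.length : Int) 1).foldl
            (fun prod bit =>
              -- 1 << bit with bit ≥ 0: '<<<' on a Nat shift is exact; bit.toNat is exact since bit ≥ 0
              if PySem.Int.band mask ((1 : Int) <<< bit.toNat) ≠ 0 then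
                PySem.List.pySetD prod bit (PySem.List.pyGetD prod bit 0 + jp.2)
              else prod)
            prod)
        (List.replicate goal_counts.length (0 : Int))
    if produced = goal_counts then some total else best

def solve_part2_machine (goal_counts : List Int) (buttons : List Int) : Option Int :=
  match PySem.List.max? goal_counts (fun x => x) with
  | none => none     -- Python raises ValueError on empty goal_counts; excluded by Pre_
  | some max_presses =>
    (pvProdA (PySem.List.pyRange 0 (max_presses + 1) 1) buttons.length).foldl
      (pvStepA goal_counts buttons) none

-- ===== PORT B =====

-- [1 if mask & (1 << bit) else 0 for bit in range(n)]
def pvContrib (n : Nat) (mask : Int) : List Int :=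
  (PySem.List.pyRange 0 (n : Int) 1).map
    (fun bit => if PySem.Int.band mask ((1 : Int) <<< bit.toNat) ≠ 0 then (1 : Int) else 0)

-- rec(bs, remaining) of Source B
def pvRecB (n : Nat) (m : Int) : List Int → List Int → Option Int
  | remaining, bs =>
    if remaining.any (fun r => r < 0) then none
    else
      match bs with
      | [] => if remaining.all (fun r => r == 0) then some 0 else none
      | mask :: bs' =>
        let c := pvContrib n mask
        (PySem.List.pyRange 0 (m + 1) 1).foldl
          (fun best p =>
            match pvRecB n m (remaining.zipWith (fun r ci => r - p * ci) c) bs' with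
            | none => best
            | some sub =>
              match best with
              | none => some (p + sub)
              | some b => if p + sub < b then some (p + sub) else best)
          none

def solve_part2_machine_alt (goal_counts : List Int) (buttons : List Int) : Option Int :=
  match PySem.List.max? goal_counts (fun x => x) with
  | none => none     -- max(goal_counts) raises ValueError; excluded by Pre_
  | some max_presses => pvRecB goal_counts.length max_presses goal_counts buttons

-- ===== PRECONDITION & SPEC =====
-- Pre_ excludes exactly the empty goal_counts, on which Python A raises ValueError in max().
def Pre_solve_part2_machine (goal_counts : List Int) (buttons : List Int) : Prop :=
  goal_counts ≠ []
instance (goal_counts : List Int) (buttons : List Int) : Decidable (Pre_solve_part2_machine goal_counts buttons) := by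
  unfold Pre_solve_part2_machine; infer_instance
def pvWitness_solve_part2_machine : List Int × List Int := ([1, 0], [1, 2])

def Spec_solve_part2_machine (goal_counts : List Int) (buttons : List Int) (out : Option Int) : Prop := out = solve_part2_machine_alt goal_counts buttons
instance (goal_counts : List Int) (buttons : List Int) (out : Option Int) : Decidable (Spec_solve_part2_machine goal_counts buttons out) := by unfold Spec_solve_part2_machine; infer_instance

-- ===== CLAIM (what is proved, stated in full; the proofs are below) =====
def Claim_equal_solve_part2_machine : Prop := ∀ (goal_counts : List Int) (buttons : List Int), Dom_solve_part2_machine goal_counts buttons → Pre_solve_part2_machine goal_counts buttons → Spec_solve_part2_machine goal_counts buttons (solve_part2_machine goal_counts buttons)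

-- ===== LEMMAS AND PROOFS =====

-- min-combining of an optional best with a new total (the shape both loops reduce to)
def pvOmin (o : Option Int) (t : Int) : Option Int :=
  match o with | none => some t | some b => some (min b t)

def pvMerge : Option Int → Option Int → Option Int
  | none, o => o
  | some a, none => some a
  | some a, some b => some (min a b)

def pvListMin (l : List Int) : Option Int := l.foldl pvOmin none

-- remaining vector after one button pressed p times (Source B's zip comprehension)
def pvVsub (rem : List Int) (p : Int) (c : List Int) : List Int :=
  rem.zipWith (fun r ci => r - p * ci) c

-- remaining vector after a sequence of (mask, presses) pairs
def pvRemAfterP (n : Nat) : List (Int × Int) → List Int → List Int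
  | [], rem => rem
  | (mask, p) :: t, rem => pvRemAfterP n t (pvVsub rem p (pvContrib n mask))

-- A's inner bit loop as a named function (definitionally the lambda in pvStepA)
def pvInner (n : Nat) (mask p : Int) (prod : List Int) : List Int :=
  (PySem.List.pyRange 0 (n : Int) 1).foldl
    (fun prod bit =>
      if PySem.Int.band mask ((1 : Int) <<< bit.toNat) ≠ 0 then
        PySem.List.pySetD prod bit (PySem.List.pyGetD prod bit 0 + p)
      else prod)
    prod

def pvProducedA (n : Nat) (buttons cs : List Int) : List Int :=
  (buttons.zip cs).foldl (fun prod mp => pvInner n mp.1 mp.2 prod) (List.replicate n (0 : Int))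

-- the matched totals of a block of combinations
def pvTotals (n : Nat) (R : List Int) (bs rem : List Int) : List Int :=
  (pvProdA R bs.length).filterMap
    (fun c => if pvRemAfterP n (bs.zip c) rem = List.replicate n 0 then some c.sum else none)

lemma pvMerge_none_right (o : Option Int) : pvMerge o none = o := by
  cases o <;> rfl

lemma pvMerge_omin (acc : Option Int) (x : Int) (o : Option Int) :
    pvMerge (pvOmin acc x) o = pvMerge acc (pvMerge (some x) o) := by
  cases acc <;> cases o <;> simp [pvOmin, pvMerge, min_assoc]

lemma foldl_omin_eq_merge (l : List Int) : ∀ acc : Option Int,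
    l.foldl pvOmin acc = pvMerge acc (pvListMin l) := by
  induction l with
  | nil => intro acc; simp [pvListMin, pvMerge_none_right]
  | cons x t ih =>
    intro acc
    have h1 : pvListMin (x :: t) = pvMerge (some x) (pvListMin t) := by
      simp only [pvListMin, List.foldl_cons]
      rw [ih]; rfl
    simp only [List.foldl_cons, ih, h1, pvMerge_omin]

lemma pvListMin_map_add (p : Int) (l : List Int) :
    pvListMin (l.map (fun s => p + s)) = (pvListMin l).map (fun s => p + s) := by
  suffices h : ∀ acc : Option Int, (l.map (fun s => p + s)).foldl pvOmin (acc.map (fun s => p + s)) = (l.foldl pvOmin acc).map (fun s => p + s) by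
    simpa using h none
  induction l with
  | nil => intro acc; simp
  | cons x t ih =>
    intro acc
    have : pvOmin (acc.map (fun s => p + s)) (p + x) = (pvOmin acc x).map (fun s => p + s) := by
      cases acc <;> simp [pvOmin]
    simp only [List.map_cons, List.foldl_cons, this, ih]

lemma foldl_omin_flatMap {α : Type} (l : List α) (f : α → List Int) : ∀ acc : Option Int,
    (l.flatMap f).foldl pvOmin acc = l.foldl (fun a x => pvMerge a (pvListMin (f x))) acc := by
  induction l with
  | nil => intro acc; simp
  | cons x t ih =>
    intro acc
    simp only [List.flatMap_cons, List.foldl_append, List.foldl_cons, foldl_omin_eq_merge, ih]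

-- fold with a guarded min IS the min of the matched totals
lemma foldl_guard_eq_filterMap {α : Type} (P : α → Prop) [DecidablePred P] (f : α → Int)
    (l : List α) : ∀ acc : Option Int,
    l.foldl (fun a c => if P c then pvOmin a (f c) else a) acc
      = (l.filterMap (fun c => if P c then some (f c) else none)).foldl pvOmin acc := by
  induction l with
  | nil => intro acc; simp
  | cons x t ih =>
    intro acc
    by_cases h : P x <;> simp [h, ih]

lemma mem_pvProdA {R : List Int} {B : Nat} {c : List Int} (h : c ∈ pvProdA R B) :
    c.length = B ∧ ∀ x ∈ c, x ∈ R := by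
  induction B generalizing c with
  | zero => simp [pvProdA] at h; simp [h]
  | succ B ih =>
    simp only [pvProdA, List.mem_flatMap, List.mem_map] at h
    obtain ⟨x, hx, c', hc', rfl⟩ := h
    obtain ⟨hl, hm⟩ := ih hc'
    constructor
    · simp [hl]
    · intro y hy
      rcases List.mem_cons.mp hy with rfl | hy
      · exact hx
      · exact hm y hy

lemma pvContrib_getD {n : Nat} {i : Nat} (hi : i < n) (mask : Int) :
    (pvContrib n mask).getD i 0
      = if PySem.Int.band mask ((1 : Int) <<< (i : Int)) ≠ 0 then (1 : Int) else 0 := by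
  have h := PySem.List.pyGetD_map_pyRange
    (f := fun bit => if PySem.Int.band mask ((1 : Int) <<< (bit.toNat : Int)) ≠ 0 then (1 : Int) else 0)
    (n := n) (k := i) (d := (0:Int)) hi
  rw [pvContrib, ← PySem.List.pyGetD_natCast, h]
  simp

lemma pvContrib_length (n : Nat) (mask : Int) : (pvContrib n mask).length = n := by
  simp [pvContrib, PySem.List.length_pyRange_one]

lemma pvVsub_getD {rem c : List Int} {n i : Nat} (hr : rem.length = n) (hc : c.length = n)
    (hi : i < n) (p : Int) :
    (pvVsub rem p c).getD i 0 = rem.getD i 0 - p * c.getD i 0 := by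
  rw [List.getD_eq_getElem _ _ (by simp [pvVsub, hr, hc]; omega),
      List.getD_eq_getElem _ _ (by omega), List.getD_eq_getElem _ _ (by omega)]
  simp [pvVsub]

lemma pvVsub_length {rem c : List Int} {n : Nat} (hr : rem.length = n) (hc : c.length = n)
    (p : Int) : (pvVsub rem p c).length = n := by
  simp [pvVsub, hr, hc]

lemma pvRemAfterP_length {n : Nat} : ∀ (ps : List (Int × Int)) (rem : List Int),
    rem.length = n → (pvRemAfterP n ps rem).length = n := by
  intro ps
  induction ps with
  | nil => intro rem h; simpa [pvRemAfterP]
  | cons q t ih =>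
    intro rem h
    obtain ⟨mask, p⟩ := q
    exact ih _ (pvVsub_length h (pvContrib_length n mask) p)

lemma pvRemAfterP_mono {n : Nat} : ∀ (ps : List (Int × Int)) (rem : List Int),
    rem.length = n → (∀ q ∈ ps, 0 ≤ q.2) → ∀ i < n,
    (pvRemAfterP n ps rem).getD i 0 ≤ rem.getD i 0 := by
  intro ps
  induction ps with
  | nil => intro rem h _ i hi; simp [pvRemAfterP]
  | cons q t ih =>
    intro rem h hq i hi
    obtain ⟨mask, p⟩ := q
    have hp : 0 ≤ p := hq (mask, p) (List.mem_cons_self ..)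
    have h2 := ih (pvVsub rem p (pvContrib n mask))
      (pvVsub_length h (pvContrib_length n mask) p)
      (fun q hqq => hq q (List.mem_cons_of_mem _ hqq)) i hi
    have h3 : (pvVsub rem p (pvContrib n mask)).getD i 0
        = rem.getD i 0 - p * (pvContrib n mask).getD i 0 :=
      pvVsub_getD h (pvContrib_length n mask) hi p
    have h4 := pvContrib_getD hi mask
    simp only [pvRemAfterP]
    rw [h3] at h2
    rw [h4] at h2
    split_ifs at h2 <;> nlinarith

lemma pv_ite_shift {X Y : Int} {i k : Nat} (b : Prop) [Decidable b] (hik : i ≠ k) :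
    (if i < k ∧ b then X else Y) = (if i < k + 1 ∧ b then X else Y) :=
  if_congr ⟨fun h => ⟨by omega, h.2⟩, fun h => ⟨by omega, h.2⟩⟩ rfl rfl

-- A's inner loop adds p at exactly the set bits: partial-range form
lemma pvInner_aux (n : Nat) (mask p : Int) (prod : List Int) (hp : prod.length = n) :
    ∀ k : Nat, k ≤ n →
    ((PySem.List.pyRange 0 (k : Int) 1).foldl
      (fun prod bit =>
        if PySem.Int.band mask ((1 : Int) <<< bit.toNat) ≠ 0 then
          PySem.List.pySetD prod bit (PySem.List.pyGetD prod bit 0 + p)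
        else prod) prod).length = n ∧
    ∀ i < n, ((PySem.List.pyRange 0 (k : Int) 1).foldl
      (fun prod bit =>
        if PySem.Int.band mask ((1 : Int) <<< bit.toNat) ≠ 0 then
          PySem.List.pySetD prod bit (PySem.List.pyGetD prod bit 0 + p)
        else prod) prod).getD i 0
      = if i < k ∧ PySem.Int.band mask ((1 : Int) <<< (i : Int)) ≠ 0 then prod.getD i 0 + p
        else prod.getD i 0 := by
  intro k
  induction k with
  | zero =>
    intro _
    rw [PySem.List.pyRange_one_eq_nil (by simp)]
    simp [hp]
  | succ k ih =>
    intro hk1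
    obtain ⟨hlen, hget⟩ := ih (by omega)
    have hcast : ((k + 1 : Nat) : Int) = (k : Int) + 1 := by push_cast; ring
    rw [hcast, PySem.List.pyRange_one_succ_right (by positivity), List.foldl_append]
    simp only [List.foldl_cons, List.foldl_nil, Int.toNat_natCast]
    set resk := ((PySem.List.pyRange 0 (k : Int) 1).foldl
      (fun prod bit =>
        if PySem.Int.band mask ((1 : Int) <<< bit.toNat) ≠ 0 then
          PySem.List.pySetD prod bit (PySem.List.pyGetD prod bit 0 + p)
        else prod) prod) with hresk
    by_cases hset : PySem.Int.band mask ((1 : Int) <<< (k : Int)) ≠ 0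
    · rw [if_pos hset, PySem.List.pySetD_natCast]
      refine ⟨by simp [hlen], fun i hi => ?_⟩
      rw [List.getD_eq_getElem _ _ (by simp [hlen]; omega), List.getElem_set]
      by_cases hik : k = i
      · rw [if_pos hik, PySem.List.pyGetD_natCast]
        have h0 := hget k (by omega)
        rw [if_neg (by omega)] at h0
        rw [h0, if_pos ⟨by omega, by rw [← hik]; exact hset⟩, hik]
      · rw [if_neg hik, ← List.getD_eq_getElem resk _ (by omega), hget i hi]
        exact pv_ite_shift _ (fun h => hik h.symm)
    · rw [if_neg hset]
      refine ⟨hlen, fun i hi => ?_⟩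
      rw [hget i hi]
      by_cases hik : i = k
      · subst hik
        rw [if_neg (by rintro ⟨h1, _⟩; omega), if_neg (fun h => hset h.2)]
      · exact pv_ite_shift _ hik

lemma pvInner_spec (n : Nat) (mask p : Int) (prod : List Int) (hp : prod.length = n) :
    (pvInner n mask p prod).length = n ∧
    ∀ i < n, (pvInner n mask p prod).getD i 0
      = prod.getD i 0 + p * (pvContrib n mask).getD i 0 := by
  obtain ⟨hl, hg⟩ := pvInner_aux n mask p prod hp n le_rfl
  refine ⟨hl, fun i hi => ?_⟩
  rw [show pvInner n mask p prod = ((PySem.List.pyRange 0 (n : Int) 1).foldl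
      (fun prod bit =>
        if PySem.Int.band mask ((1 : Int) <<< bit.toNat) ≠ 0 then
          PySem.List.pySetD prod bit (PySem.List.pyGetD prod bit 0 + p)
        else prod) prod) from rfl, hg i hi, pvContrib_getD hi mask]
  by_cases hb : PySem.Int.band mask ((1 : Int) <<< (i : Int)) ≠ 0
  · rw [if_pos ⟨hi, hb⟩, if_pos hb]; ring
  · rw [if_neg (fun h => hb h.2), if_neg hb]; ring

-- produced[] and remaining[] are complementary: their sum per bit is invariant
lemma pv_pair_invariant {n : Nat} : ∀ (ps : List (Int × Int)) (prod rem : List Int),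
    prod.length = n → rem.length = n →
    (ps.foldl (fun prod mp => pvInner n mp.1 mp.2 prod) prod).length = n ∧
    ∀ i < n, (ps.foldl (fun prod mp => pvInner n mp.1 mp.2 prod) prod).getD i 0
        + (pvRemAfterP n ps rem).getD i 0 = prod.getD i 0 + rem.getD i 0 := by
  intro ps
  induction ps with
  | nil => intro prod rem hp hr; exact ⟨hp, fun i hi => rfl⟩
  | cons q t ih =>
    intro prod rem hp hr
    obtain ⟨mask, p⟩ := q
    obtain ⟨hl1, hg1⟩ := pvInner_spec n mask p prod hp
    have hr1 : (pvVsub rem p (pvContrib n mask)).length = n :=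
      pvVsub_length hr (pvContrib_length n mask) p
    obtain ⟨hl2, hg2⟩ := ih (pvInner n mask p prod) (pvVsub rem p (pvContrib n mask)) hl1 hr1
    refine ⟨hl2, fun i hi => ?_⟩
    have := hg2 i hi
    simp only [List.foldl_cons, pvRemAfterP]
    rw [this, hg1 i hi, pvVsub_getD hr (pvContrib_length n mask) hi p]
    ring

lemma pvProducedA_iff {n : Nat} {buttons c goal : List Int} (hg : goal.length = n) :
    pvProducedA n buttons c = goal ↔
      pvRemAfterP n (buttons.zip c) goal = List.replicate n 0 := by
  obtain ⟨hl, hs⟩ := pv_pair_invariant (n := n) (buttons.zip c)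
    (List.replicate n 0) goal (by simp) hg
  have hrl : (pvRemAfterP n (buttons.zip c) goal).length = n :=
    pvRemAfterP_length (buttons.zip c) goal hg
  have e1 : ∀ i, i < n → (List.replicate n (0:Int)).getD i 0 = 0 := by
    intro i hi
    rw [List.getD_eq_getElem _ _ (by simpa using hi)]; simp
  have hF : pvProducedA n buttons c
      = (buttons.zip c).foldl (fun prod mp => pvInner n mp.1 mp.2 prod)
          (List.replicate n (0:Int)) := rfl
  rw [hF]
  constructor
  · intro h
    refine List.ext_getElem (by simp [hrl]) ?_
    intro i hi hi2
    have hi' : i < n := by omega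
    have h2 := hs i hi'
    rw [h, e1 i hi', List.getD_eq_getElem (pvRemAfterP n (buttons.zip c) goal) 0 (by omega)] at h2
    simp only [List.getElem_replicate]
    omega
  · intro h
    refine List.ext_getElem (by omega) ?_
    intro i hi hi2
    have hi' : i < n := by omega
    have h2 := hs i hi'
    rw [h, e1 i hi', List.getD_eq_getElem _ _ hi, List.getD_eq_getElem _ _ hi2] at h2
    omega

-- enumerate over counts indexing buttons IS the zip of buttons with counts
lemma pv_enum_zip (g : Int → Int → List Int → List Int) :
    ∀ (cs bs pre : List Int) (init : List Int), cs.length = bs.length →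
    (PySem.List.enumerate cs (pre.length : Int)).foldl
        (fun prod jp => g (PySem.List.pyGetD (pre ++ bs) jp.1 0) jp.2 prod) init
      = (bs.zip cs).foldl (fun prod mp => g mp.1 mp.2 prod) init := by
  intro cs
  induction cs with
  | nil =>
    intro bs pre init h
    have : bs = [] := List.eq_nil_of_length_eq_zero h.symm
    subst this
    simp [PySem.List.enumerate]
  | cons p cs' ih =>
    intro bs pre init h
    cases bs with
    | nil => simp at h
    | cons mask bs' =>
      rw [PySem.List.enumerate_cons, List.foldl_cons]
      have h1 : PySem.List.pyGetD (pre ++ mask :: bs') (pre.length : Int) 0 = mask := by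
        rw [PySem.List.pyGetD_natCast]
        rw [List.getD_eq_getElem _ _ (by simp)]
        rw [List.getElem_append_right (by omega)]
        simp
      rw [h1]
      have h2 : ((pre.length : Int) + 1) = ((pre ++ [mask]).length : Int) := by
        simp
      have h3 : pre ++ mask :: bs' = (pre ++ [mask]) ++ bs' := by simp
      rw [h2, h3, ih bs' (pre ++ [mask]) (g mask p init) (by simpa using h)]
      simp [List.zip_cons_cons]

-- B's recursion computes the minimum matched total over the whole product space
lemma pv_all_zero_iff {rem : List Int} {n : Nat} (hr : rem.length = n) :
    (rem.all (fun r => r == 0) = true) ↔ rem = List.replicate n 0 := by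
  rw [List.all_eq_true, List.eq_replicate_iff]
  constructor
  · intro h; exact ⟨hr, fun b hb => by simpa using h b hb⟩
  · intro h b hb; simpa using h.2 b hb

lemma pv_any_neg_not_rep {rem : List Int} {n : Nat}
    (hneg : rem.any (fun r => decide (r < 0)) = true) : rem ≠ List.replicate n 0 := by
  intro h
  obtain ⟨x, hx, hlt⟩ := List.any_eq_true.mp hneg
  rw [h] at hx
  have := List.eq_of_mem_replicate hx
  simp at hlt; omega

lemma pvRecB_eq_min (n : Nat) (m : Int) : ∀ (bs rem : List Int), rem.length = n →
    pvRecB n m rem bs = pvListMin (pvTotals n (PySem.List.pyRange 0 (m + 1) 1) bs rem) := by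
  intro bs
  induction bs with
  | nil =>
    intro rem hr
    have hT : pvTotals n (PySem.List.pyRange 0 (m + 1) 1) [] rem
        = if rem = List.replicate n 0 then [(0:Int)] else [] := by
      simp only [pvTotals, List.length_nil, pvProdA, List.filterMap_cons, List.filterMap_nil]
      have hra : pvRemAfterP n (([]: List Int).zip ([]: List Int)) rem = rem := rfl
      rw [hra]
      split_ifs with h <;> simp
    rw [pvRecB, hT]
    by_cases hneg : rem.any (fun r => decide (r < 0)) = true
    · rw [if_pos hneg, if_neg (pv_any_neg_not_rep hneg)]
      rfl
    · rw [if_neg hneg]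
      by_cases hz : rem = List.replicate n 0
      · rw [if_pos ((pv_all_zero_iff hr).mpr hz), if_pos hz]
        rfl
      · rw [if_neg (fun h => hz ((pv_all_zero_iff hr).mp h)), if_neg hz]
        rfl
  | cons mask bs' ih =>
    intro rem hr
    set R := PySem.List.pyRange 0 (m + 1) 1 with hR
    have hcl : (pvContrib n mask).length = n := pvContrib_length n mask
    have hT : pvTotals n R (mask :: bs') rem
        = R.flatMap (fun x => (pvTotals n R bs' (pvVsub rem x (pvContrib n mask))).map
            (fun s => x + s)) := by
      simp only [pvTotals, List.length_cons, pvProdA, List.filterMap_flatMap]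
      apply List.flatMap_congr
      intro x hx
      rw [List.filterMap_map]
      have hfun : ((fun c => if pvRemAfterP n ((mask :: bs').zip c) rem = List.replicate n 0
              then some c.sum else none) ∘ (x :: ·))
          = fun c' => (if pvRemAfterP n (bs'.zip c') (pvVsub rem x (pvContrib n mask))
              = List.replicate n 0 then some c'.sum else none).map (fun s => x + s) := by
        funext c'
        simp only [Function.comp_apply]
        have hz : (mask :: bs').zip (x :: c') = (mask, x) :: bs'.zip c' := rfl
        have hrw : pvRemAfterP n ((mask, x) :: bs'.zip c') rem
            = pvRemAfterP n (bs'.zip c') (pvVsub rem x (pvContrib n mask)) := rfl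
        rw [hz, hrw]
        split_ifs <;> simp [List.sum_cons]
      rw [hfun, ← List.map_filterMap]
    by_cases hneg : rem.any (fun r => r < 0) = true
    · rw [pvRecB, if_pos hneg]
      obtain ⟨xneg, hxm, hxlt⟩ := List.any_eq_true.mp hneg
      obtain ⟨i, hi, hxi⟩ := List.mem_iff_getElem.mp hxm
      have hi' : i < n := by omega
      have hRHS : pvTotals n R (mask :: bs') rem = [] := by
        rw [pvTotals]
        rw [List.filterMap_eq_nil_iff]
        intro c hcmem
        obtain ⟨hclen, hcel⟩ := mem_pvProdA hcmem
        rw [if_neg]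
        intro habs
        have hmono := pvRemAfterP_mono ((mask :: bs').zip c) rem hr
          (fun q hq => by
            have h2 := (List.of_mem_zip hq).2
            have h3 := hcel q.2 h2
            have := (PySem.List.mem_pyRange_one.mp (hR ▸ h3)).1
            omega) i hi'
        rw [habs] at hmono
        have h0 : (List.replicate n (0:Int)).getD i 0 = 0 := by
          rw [List.getD_eq_getElem _ _ (by simpa using hi')]; simp
        rw [h0, List.getD_eq_getElem _ _ hi, hxi] at hmono
        simp at hxlt
        omega
      rw [hRHS]
      rfl
    · rw [pvRecB, if_neg hneg, hT, pvListMin, foldl_omin_flatMap]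
      apply PySem.List.foldl_congr_mem
      intro acc x hxR
      have hva : (pvVsub rem x (pvContrib n mask)).length = n := pvVsub_length hr hcl x
      rw [pvListMin_map_add, ← ih (pvVsub rem x (pvContrib n mask)) hva]
      show (match pvRecB n m (rem.zipWith (fun r ci => r - x * ci) (pvContrib n mask)) bs' with
            | none => acc
            | some sub =>
              match acc with
              | none => some (x + sub)
              | some b => if x + sub < b then some (x + sub) else acc)
          = pvMerge acc ((pvRecB n m (pvVsub rem x (pvContrib n mask)) bs').map (fun s => x + s))
      have hvv : rem.zipWith (fun r ci => r - x * ci) (pvContrib n mask)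
          = pvVsub rem x (pvContrib n mask) := rfl
      rw [hvv]
      cases pvRecB n m (pvVsub rem x (pvContrib n mask)) bs' with
      | none => cases acc <;> rfl
      | some sub =>
        cases acc with
        | none => rfl
        | some b =>
          simp only [Option.map_some, pvMerge]
          split_ifs with hlt
          · congr 1; omega
          · congr 1; omega

-- A's loop body is the guarded-min step
lemma pvStepA_eq (goal buttons : List Int) (acc : Option Int) (c : List Int)
    (hc : c.length = buttons.length) :
    pvStepA goal buttons acc c
      = if pvRemAfterP goal.length (buttons.zip c) goal = List.replicate goal.length 0
        then pvOmin acc c.sum else acc := by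
  have henum :
      (PySem.List.enumerate c).foldl
        (fun prod jp =>
          let mask := PySem.List.pyGetD buttons jp.1 0
          (PySem.List.pyRange 0 (goal.length : Int) 1).foldl
            (fun prod bit =>
              if PySem.Int.band mask ((1 : Int) <<< bit.toNat) ≠ 0 then
                PySem.List.pySetD prod bit (PySem.List.pyGetD prod bit 0 + jp.2)
              else prod) prod)
        (List.replicate goal.length (0 : Int))
      = pvProducedA goal.length buttons c := by
    have h := pv_enum_zip (fun mask p prod => pvInner goal.length mask p prod) c buttons []
      (List.replicate goal.length (0:Int)) (by simpa using hc)
    simpa [pvInner, pvProducedA] using h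
  have hiff := pvProducedA_iff (n := goal.length) (buttons := buttons) (c := c) rfl
  cases acc with
  | none =>
    simp only [pvStepA, henum]
    rw [if_neg (by simp)]
    exact if_congr hiff rfl rfl
  | some b =>
    by_cases hge : c.sum ≥ b
    · simp only [pvStepA, henum]
      rw [if_pos (by simpa using hge)]
      split_ifs with h1
      · show some b = pvOmin (some b) c.sum
        simp only [pvOmin]
        congr 1
        omega
      · rfl
    · simp only [pvStepA, henum]
      rw [if_neg (by simpa using hge)]
      have : (if pvProducedA goal.length buttons c = goal then some c.sum else some b)
          = if pvRemAfterP goal.length (buttons.zip c) goal = List.replicate goal.length 0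
            then pvOmin (some b) c.sum else some b := by
        refine if_congr hiff ?_ rfl
        simp only [pvOmin]
        congr 1
        omega
      exact this

-- ===== VERDICT (by name: the statement is the Claim_ definition above) =====
theorem solve_part2_machine_spec : Claim_equal_solve_part2_machine := by
  intro goal buttons _ _
  unfold Spec_solve_part2_machine solve_part2_machine solve_part2_machine_alt
  cases hmax : PySem.List.max? goal (fun x => x) with
  | none => rfl
  | some m =>
    simp only []
    have h1 : List.foldl (pvStepA goal buttons) none
          (pvProdA (PySem.List.pyRange 0 (m + 1) 1) buttons.length)
        = List.foldl (fun acc c =>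
            if pvRemAfterP goal.length (buttons.zip c) goal = List.replicate goal.length 0
            then pvOmin acc c.sum else acc) none
          (pvProdA (PySem.List.pyRange 0 (m + 1) 1) buttons.length) :=
      PySem.List.foldl_congr_mem _ _ _ _ (fun acc c hcm => pvStepA_eq goal buttons acc c (mem_pvProdA hcm).1)
    rw [h1, foldl_guard_eq_filterMap, pvRecB_eq_min goal.length m buttons goal rfl]
    rfl
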